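-- pv_equiv track=rewrite | github.com/josemvelazquezf-N0v/Image-Live-nonLive-Reader | CapturaVideo.py | combinar_textos
-- ===== SOURCE A (Python) =====
-- from collections import Counter
--
-- def combinar_textos(lista_textos):
--     textos = [t.strip() for t in lista_textos if t and t.strip()]
--     if not textos:
--         return ""
--
--     conteo = Counter(textos)
--     texto_mas_comun, freq = conteo.most_common(1)[0]
--     total = len(textos)
--
--     # Si el texto más común aparece en al menos el 60% de las capturas, lo usamos
--     if freq / total >= 0.6:
--         return texto_mas_comun
--
--     # Si no hay mayoría clara, se elige el texto más largo
--     return max(textos, key=len)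
-- ===== SOURCE B (Python) =====
-- def combinar_textos(lista_textos):
--     textos = [t.strip() for t in lista_textos if t and t.strip()]
--     if not textos:
--         return ""
--
--     # Boyer-Moore majority vote: one pass, no frequency table.
--     cand, cnt = None, 0
--     for t in textos:
--         if cnt == 0:
--             cand, cnt = t, 1
--         elif cand == t:
--             cnt += 1
--         else:
--             cnt -= 1
--
--     # Verification pass: any text reaching the 60% threshold is a strict
--     # majority, which Boyer-Moore is guaranteed to surface.
--     if textos.count(cand) / len(textos) >= 0.6:
--         return cand
--
--     # No clear majority: pick the longest text (first one on ties).
--     longest = textos[0]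
--     for t in textos[1:]:
--         if len(t) > len(longest):
--             longest = t
--     return longest
-- ===== Notes on version B (the rewrite author's own statement) =====
-- stated objective: alternative
-- what changed: Replaces the Counter frequency table and most_common(1) with a Boyer-Moore majority vote (one pass, candidate+counter) plus a verification count: any text reaching the 60% threshold is a strict majority, which Boyer-Moore surfaces; the longest-text fallback becomes an explicit running-max loop.
import Mathlib
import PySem

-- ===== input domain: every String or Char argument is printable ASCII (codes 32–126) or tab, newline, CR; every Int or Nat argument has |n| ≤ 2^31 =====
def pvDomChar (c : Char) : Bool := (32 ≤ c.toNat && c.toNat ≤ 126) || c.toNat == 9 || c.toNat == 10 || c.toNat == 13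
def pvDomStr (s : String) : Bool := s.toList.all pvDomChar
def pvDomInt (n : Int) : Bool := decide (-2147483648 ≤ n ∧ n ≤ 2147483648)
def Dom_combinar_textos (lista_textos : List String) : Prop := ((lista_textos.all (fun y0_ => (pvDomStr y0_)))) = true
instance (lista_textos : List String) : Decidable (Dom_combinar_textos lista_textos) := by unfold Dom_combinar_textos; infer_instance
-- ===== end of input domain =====

-- B replaces A's Counter/most_common frequency table by a Boyer-Moore majority vote with a
-- verification count (a 60% text is a strict majority, which the vote surfaces) and an explicit
-- running-max loop for the longest-text fallback: an alternative algorithm of the same cost.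


-- ===== PORT A =====
-- textos = [t.strip() for t in lista_textos if t and t.strip()]
def pvTextos (lista_textos : List String) : List String :=
  (lista_textos.filter (fun t => !(t == "") && !(PySem.Str.strip t == ""))).map PySem.Str.strip

-- 'freq / total >= 0.6' (float) is ported as the integer comparison 3*total ≤ 5*freq; the two agree
-- exactly whenever total < 7*10^15 (the float quotient is correctly rounded), so on every feasible list.
def combinar_textos (lista_textos : List String) : String :=
  let textos := pvTextos lista_textos
  if textos = [] then ""
  else
    -- conteo = Counter(textos); texto_mas_comun, freq = conteo.most_common(1)[0]
    -- (most_common(1) returns the first-inserted key of maximal count = max by count; nonempty here)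
    match PySem.List.max? (PySem.Dict.counter textos).items (fun p => p.2) with
    | none => ""  -- unreachable: textos ≠ [] so the Counter has items
    | some (texto_mas_comun, freq) =>
      if 3 * PySem.List.len textos ≤ 5 * freq then texto_mas_comun
      else
        -- max(textos, key=len): first element of maximal length
        match PySem.List.max? textos (fun t => PySem.Str.len t) with
        | none => ""  -- unreachable: textos ≠ []
        | some m => m

-- ===== PORT B =====
-- one Boyer-Moore voting step on state (cand, cnt)
def pvBmStep (s : Option String × Int) (t : String) : Option String × Int :=
  if s.2 = 0 then (some t, 1)
  else if s.1 = some t then (s.1, s.2 + 1)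
  else (s.1, s.2 - 1)

def combinar_textos_alt (lista_textos : List String) : String :=
  let textos := pvTextos lista_textos
  if textos = [] then ""
  else
    match (textos.foldl pvBmStep ((none : Option String), (0 : Int))).1 with
    | none => ""  -- unreachable: textos ≠ [] always leaves a candidate
    | some cand =>
      -- textos.count(cand) / len(textos) >= 0.6, same integer form as in port A
      if 3 * PySem.List.len textos ≤ 5 * (PySem.List.count textos cand : Int) then cand
      else
        match textos with
        | [] => ""  -- unreachable
        | h :: tl => tl.foldl (fun longest t =>
            if PySem.Str.len longest < PySem.Str.len t then t else longest) h

-- ===== PRECONDITION & SPEC =====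
def Spec_combinar_textos (lista_textos : List String) (out : String) : Prop := out = combinar_textos_alt lista_textos
instance (lista_textos : List String) (out : String) : Decidable (Spec_combinar_textos lista_textos out) := by unfold Spec_combinar_textos; infer_instance

-- ===== CLAIM (what is proved, stated in full; the proofs are below) =====
def Claim_equal_combinar_textos : Prop := ∀ (lista_textos : List String), Dom_combinar_textos lista_textos → Spec_combinar_textos lista_textos (combinar_textos lista_textos)

-- ===== LEMMAS AND PROOFS =====

-- The Boyer-Moore fold always ends with some candidate drawn from the input (or the start state).
theorem pvBm_some : ∀ (l : List String) (c : String) (k : Int),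
    ∃ x, (l.foldl pvBmStep (some c, k)).1 = some x ∧ (x = c ∨ x ∈ l) := by
  intro l
  induction l with
  | nil => intro c k; exact ⟨c, rfl, Or.inl rfl⟩
  | cons t rest ih =>
    intro c k
    simp only [List.foldl_cons, pvBmStep]
    split_ifs with h1 h2
    · obtain ⟨x, hx, hm⟩ := ih t 1
      exact ⟨x, hx, Or.inr (hm.elim (fun h => by simp [h]) (fun h => by simp [h]))⟩
    · obtain ⟨x, hx, hm⟩ := ih c (k + 1)
      exact ⟨x, hx, hm.imp id (fun h => List.mem_cons_of_mem _ h)⟩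
    · obtain ⟨x, hx, hm⟩ := ih c (k - 1)
      exact ⟨x, hx, hm.imp id (fun h => List.mem_cons_of_mem _ h)⟩

-- Boyer-Moore invariant: a strict majority element always survives as the candidate.
theorem pvBm_majority : ∀ (l : List String) (c : Option String) (k : Int) (x : String),
    0 ≤ k →
    (l.length : Int) < 2 * (l.count x : Int) + (if c = some x then k else -k) →
    (l.foldl pvBmStep (c, k)).1 = some x := by
  intro l
  induction l with
  | nil =>
    intro c k x hk h
    simp only [List.length_nil, List.count_nil, List.foldl_nil, Nat.cast_zero] at h ⊢
    by_cases hc : c = some x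
    · exact hc
    · rw [if_neg hc] at h; omega
  | cons t rest ih =>
    intro c k x hk h
    have hcnt : ((t :: rest).count x : Int) =
        (rest.count x : Int) + (if t = x then 1 else 0) := by
      rw [List.count_cons]
      by_cases ht : t = x
      · simp [ht]
      · simp [ht]
    simp only [List.length_cons] at h
    push_cast at h
    simp only [List.foldl_cons, pvBmStep]
    split_ifs with h1 h2
    · -- cnt = 0 → candidate becomes t with count 1
      apply ih (some t) 1 x (by omega)
      have hif0 : (if c = some x then k else -k) = 0 := by split <;> omega
      rw [hif0] at h
      by_cases ht : t = x
      · subst ht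
        rw [if_pos rfl] at hcnt ⊢
        omega
      · rw [if_neg (fun he => ht (Option.some.inj he))]
        rw [if_neg ht] at hcnt
        omega
    · -- t equals the candidate → cnt + 1
      apply ih c (k + 1) x (by omega)
      by_cases hc : c = some x
      · have ht : t = x := by
          have h' := hc; rw [h2] at h'; exact Option.some.inj h'
        rw [if_pos hc] at h ⊢
        rw [if_pos ht] at hcnt
        omega
      · have ht : t ≠ x := fun he => hc (by rw [h2, he])
        rw [if_neg hc] at h ⊢
        rw [if_neg ht] at hcnt
        omega
    · -- t differs from the candidate → cnt - 1
      apply ih c (k - 1) x (by omega)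
      by_cases hc : c = some x
      · have ht : t ≠ x := fun he => h2 (by rw [hc, he])
        rw [if_pos hc] at h ⊢
        rw [if_neg ht] at hcnt
        omega
      · rw [if_neg hc] at h ⊢
        by_cases ht : t = x
        · rw [if_pos ht] at hcnt; omega
        · rw [if_neg ht] at hcnt; omega

-- max? over a nonempty list is the running-max fold from the head (first maximal element).
theorem pvMax?_cons (key : String → Int) : ∀ (tl : List String) (h : String),
    PySem.List.max? (h :: tl) key =
      some (tl.foldl (fun b t => if key b < key t then t else b) h) := by
  intro tl
  induction tl with
  | nil => intro h; rfl
  | cons t rest ih =>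
    intro h
    have : PySem.List.max? (h :: t :: rest) key =
        PySem.List.max? ((if key h < key t then t else h) :: rest) key := by
      simp only [PySem.List.max?, List.foldl_cons]
      split_ifs <;> rfl
    rw [this, ih]
    simp only [List.foldl_cons]

-- every element's multiplicity is bounded by the count A's most_common returns,
-- and that count is the real multiplicity of the returned key
theorem pvMaxCount (textos : List String) (k : String) (f : Int)
    (hmax : PySem.List.max? (PySem.Dict.counter textos).items (fun p => p.2) = some (k, f)) :
    f = (textos.count k : Int) ∧ ∀ t ∈ textos, (textos.count t : Int) ≤ f := by
  have hmem := PySem.List.max?_mem hmax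
  rw [PySem.Dict.items_counter] at hmem
  obtain ⟨k', hk', he⟩ := List.mem_map.mp hmem
  have hk1 : k' = k := congrArg Prod.fst he
  have hk2 : ((textos.count k' : Int)) = f := congrArg Prod.snd he
  subst hk1
  refine ⟨hk2.symm, fun t ht => ?_⟩
  have hti : (t, (textos.count t : Int)) ∈ (PySem.Dict.counter textos).items := by
    rw [PySem.Dict.items_counter]
    exact List.mem_map.mpr ⟨t, (PySem.Set.mem_ofList _ _).mpr ht, rfl⟩
  exact PySem.List.max?_isMax hmax _ hti

-- ===== VERDICT (by name: the statement is the Claim_ definition above) =====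
theorem combinar_textos_spec : Claim_equal_combinar_textos := by
  intro lista_textos _
  simp only [Spec_combinar_textos, combinar_textos, combinar_textos_alt]
  generalize pvTextos lista_textos = textos
  rcases textos with _ | ⟨h, tl⟩
  · rfl
  · rw [if_neg (by simp : ¬ (h :: tl = [])), if_neg (by simp : ¬ (h :: tl = []))]
    -- A's most_common is defined (the Counter is nonempty)
    obtain ⟨kf, hkf⟩ : ∃ kf, PySem.List.max? (PySem.Dict.counter (h :: tl)).items (fun p => p.2) = some kf := by
      cases hmc : PySem.List.max? (PySem.Dict.counter (h :: tl)).items (fun p => p.2) with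
      | none =>
        exfalso
        have h0 := (PySem.List.max?_eq_none_iff _ _).mp hmc
        rw [PySem.Dict.items_counter] at h0
        simp [PySem.Set.ofList_cons] at h0
      | some kf => exact ⟨kf, rfl⟩
    obtain ⟨k, f⟩ := kf
    obtain ⟨hf, hbound⟩ := pvMaxCount _ _ _ hkf
    -- B's candidate exists and lies in the list
    have hfold : (h :: tl).foldl pvBmStep ((none : Option String), (0 : Int)) =
        tl.foldl pvBmStep (some h, 1) := by
      simp [pvBmStep]
    obtain ⟨cand, hcand, hcmem⟩ := pvBm_some tl h 1
    simp only [hkf, hfold, hcand]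
    have hcmem' : cand ∈ h :: tl := hcmem.elim (fun e => e ▸ List.mem_cons_self) (fun hm => List.mem_cons_of_mem h hm)
    have hlen : PySem.List.len (h :: tl) = ((h :: tl).length : Int) := by
      simp [PySem.List.len_eq]
    have hcount : ((PySem.List.count (h :: tl) cand : Nat) : Int) = (((h :: tl).count cand : Nat) : Int) := by
      rw [PySem.List.count_eq]
    by_cases hmaj : 3 * PySem.List.len (h :: tl) ≤ 5 * f
    · -- majority branch: k is a strict 60% majority, so Boyer-Moore found exactly k
      have hklen : (1 : Int) ≤ ((h :: tl).length : Int) := by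
        simp only [List.length_cons]; push_cast; omega
      have hstrict : ((h :: tl).length : Int) < 2 * ((h :: tl).count k : Int) := by
        rw [hlen] at hmaj; omega
      have hbm := pvBm_majority (h :: tl) none 0 k (le_refl 0)
        (by rw [if_neg (by simp)]; omega)
      rw [hfold, hcand] at hbm
      have hck : cand = k := Option.some.inj hbm
      subst hck
      rw [if_pos hmaj, if_pos (by rw [hcount, ← hf]; exact hmaj)]
    · -- no 60% majority: B's verification also fails, both take the longest text
      have hcb : ¬ 3 * PySem.List.len (h :: tl) ≤ 5 * ((PySem.List.count (h :: tl) cand : Nat) : Int) := by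
        have := hbound cand hcmem'
        rw [hcount]; omega
      rw [if_neg hmaj, if_neg hcb]
      simp only [pvMax?_cons]
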